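-- pv_equiv track=rewrite | github.com/kesavan-t-dev/Python | tasks/Day_9/index_base_addition.py | sum_digits_prealloc
-- ===== SOURCE A (Python) =====
-- def sum_digits_prealloc(numbers):
--     results = [0] * len(numbers)
--     for i in range(len(numbers)):
--         n = abs(numbers[i])
--         while n:
--             results[i] += n % 10
--             n //= 10
--     return results
-- ===== SOURCE B (Python) =====
-- def sum_digits_prealloc(numbers):
--     return [sum(int(d) for d in str(abs(n))) for n in numbers]
-- ===== Notes on version B (the rewrite author's own statement) =====
-- stated objective: idiomatic
-- what changed: Replaces the preallocated index-mutating results array and per-number while-loop of modular arithmetic (n%10, n//=10) with a single comprehension that digit-sums via the decimal string of abs(n).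
import Mathlib
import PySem

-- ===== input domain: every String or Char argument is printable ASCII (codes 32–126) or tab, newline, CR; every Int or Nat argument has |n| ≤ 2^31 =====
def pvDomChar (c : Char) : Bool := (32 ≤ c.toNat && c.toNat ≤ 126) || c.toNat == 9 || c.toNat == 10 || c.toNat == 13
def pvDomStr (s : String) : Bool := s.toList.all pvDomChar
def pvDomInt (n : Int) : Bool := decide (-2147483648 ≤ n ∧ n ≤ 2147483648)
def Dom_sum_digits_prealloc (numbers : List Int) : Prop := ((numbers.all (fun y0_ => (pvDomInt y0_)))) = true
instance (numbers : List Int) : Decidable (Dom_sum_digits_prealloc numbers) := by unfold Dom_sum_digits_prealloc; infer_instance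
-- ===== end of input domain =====

-- B replaces A's preallocated index-mutated results array and per-number while-loop of
-- modular arithmetic by a comprehension summing the digits of the decimal string of abs(n);
-- same cost, more idiomatic.

-- ===== PORT A =====
-- the 'while n' loop; n = abs(...) ≥ 0 on every call and stays ≥ 0, so truthiness 'n' is '0 < n'
def pvWhileA (results : List Int) (i : Int) (n : Int) : List Int :=
  if 0 < n then
    pvWhileA (PySem.List.pySetD results i (PySem.List.pyGetD results i 0 + PySem.Int.mod n 10))
      i (PySem.Int.floordiv n 10)
  else results
termination_by n.toNat
decreasing_by rw [PySem.Int.floordiv_eq_ediv_of_pos (by omega)]; omega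

def sum_digits_prealloc (numbers : List Int) : List Int :=
  let results := List.replicate numbers.length (0 : Int)
  (PySem.List.pyRange 0 (numbers.length : Int) 1).foldl
    (fun results i => pvWhileA results i |PySem.List.pyGetD numbers i 0|) results

-- ===== PORT B =====
-- int(d) on the single decimal-digit characters produced by str(abs(n)) is the digit's value:
-- ported exactly as code point minus 48.
def sum_digits_prealloc_alt (numbers : List Int) : List Int :=
  numbers.map (fun n => ((PySem.Int.toChars |n|).map (fun d => (d.toNat : Int) - 48)).sum)

-- ===== PRECONDITION & SPEC =====
def Spec_sum_digits_prealloc (numbers : List Int) (out : List Int) : Prop := out = sum_digits_prealloc_alt numbers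
instance (numbers : List Int) (out : List Int) : Decidable (Spec_sum_digits_prealloc numbers out) := by unfold Spec_sum_digits_prealloc; infer_instance

-- ===== CLAIM (what is proved, stated in full; the proofs are below) =====
def Claim_equal_sum_digits_prealloc : Prop := ∀ (numbers : List Int), Dom_sum_digits_prealloc numbers → Spec_sum_digits_prealloc numbers (sum_digits_prealloc numbers)

-- ===== LEMMAS AND PROOFS =====

-- reference digit sum (proof-only)
def pvDigsum (n : Nat) : Int :=
  if _h : n = 0 then 0 else ((n % 10 : Nat) : Int) + pvDigsum (n / 10)
termination_by n
decreasing_by exact Nat.div_lt_self (Nat.pos_of_ne_zero _h) (by omega)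

lemma pvDigitChar_val : ∀ m : Nat, m < 10 → ((Nat.digitChar m).toNat : Int) - 48 = m := by decide

lemma pvToDigitsCore_sum (f : Nat) : ∀ (n : Nat) (acc : List Char), n < f →
    ((Nat.toDigitsCore 10 f n acc).map (fun d => (d.toNat : Int) - 48)).sum
      = pvDigsum n + ((acc.map (fun d => (d.toNat : Int) - 48)).sum) := by
  induction f with
  | zero => intro n acc h; omega
  | succ f ih =>
    intro n acc h
    rw [Nat.toDigitsCore]
    by_cases h0 : n / 10 = 0
    · simp only [h0, if_pos]
      rw [List.map_cons, List.sum_cons, pvDigitChar_val _ (Nat.mod_lt _ (by omega))]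
      rw [pvDigsum]
      split_ifs with hn
      · subst hn; simp
      · rw [h0, show pvDigsum 0 = 0 from by rw [pvDigsum]; simp]; ring
    · simp only [h0, if_neg, not_false_iff]
      rw [ih (n / 10) _ (by omega)]
      rw [List.map_cons, List.sum_cons, pvDigitChar_val _ (Nat.mod_lt _ (by omega))]
      have hne : n ≠ 0 := by omega
      rw [show pvDigsum n = ((n % 10 : Nat) : Int) + pvDigsum (n / 10) from by
        rw [pvDigsum, dif_neg hne]]
      ring

lemma pvCharSum (x : Int) :
    ((PySem.Int.toChars |x|).map (fun d => (d.toNat : Int) - 48)).sum = pvDigsum x.natAbs := by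
  have habs : ¬ |x| < 0 := not_lt.mpr (abs_nonneg x)
  rw [PySem.Int.toChars, if_neg habs, Nat.toDigits]
  rw [pvToDigitsCore_sum _ _ _ (Nat.lt_succ_self _)]
  have : |x|.toNat = x.natAbs := by rw [Int.abs_eq_natAbs, Int.toNat_natCast]
  simp [this]

lemma pvWhileA_eq (m : Nat) : ∀ (n : Int), n.toNat = m → 0 ≤ n →
    ∀ (res : List Int) (k : Nat), k < res.length →
    pvWhileA res (k : Int) n = res.set k (res.getD k 0 + pvDigsum n.toNat) := by
  induction m using Nat.strong_induction_on with
  | _ m ih =>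
    intro n hm hn res k hk
    rw [pvWhileA]
    by_cases hpos : 0 < n
    · rw [if_pos hpos]
      rw [PySem.Int.mod_eq_emod_of_pos (by omega), PySem.Int.floordiv_eq_ediv_of_pos (by omega)]
      simp only [PySem.List.pySetD_natCast, PySem.List.pyGetD_natCast]
      rw [ih (n / 10).toNat (by omega) (n / 10) rfl (by omega) _ k (by simpa using hk)]
      rw [List.set_set]
      have hgd : (res.set k (res.getD k 0 + n % 10)).getD k (0:Int) = res.getD k 0 + n % 10 := by
        simp [List.getD, List.getElem?_set_self hk]
      rw [hgd]
      have hds : pvDigsum n.toNat = ((n.toNat % 10 : Nat) : Int) + pvDigsum (n.toNat / 10) := by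
        rw [pvDigsum]; rw [dif_neg (by omega)]
      rw [hds]
      have h1 : n % 10 = ((n.toNat % 10 : Nat) : Int) := by omega
      have h2 : (n / 10).toNat = n.toNat / 10 := by omega
      rw [h1, h2]; ring_nf
    · rw [if_neg hpos]
      have hn0 : n = 0 := by omega
      subst hn0
      rw [show (0:Int).toNat = 0 from rfl, pvDigsum, dif_pos rfl, add_zero]
      have : res.getD k 0 = res[k] := List.getD_eq_getElem res 0 hk
      rw [this, List.set_getElem_self]

lemma pvTakeSet (res : List Int) (k : Nat) (v : Int) (hk : k < res.length) :
    (res.set k v).take (k + 1) = res.take k ++ [v] := by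
  rw [List.take_add_one, List.take_set, List.getElem?_set_self hk]
  have : (List.take k res).set k v = List.take k res := by
    apply List.set_eq_of_length_le
    simp
  rw [this]; rfl

lemma pvFoldA (numbers : List Int) (m : Nat) : ∀ (k : Nat) (res : List Int),
    numbers.length - k = m → res.length = numbers.length →
    (∀ j, k ≤ j → res.getD j 0 = 0) →
    (PySem.List.pyRange (k : Int) (numbers.length : Int) 1).foldl
        (fun r i => pvWhileA r i |PySem.List.pyGetD numbers i 0|) res
      = res.take k ++ (numbers.drop k).map (fun x => pvDigsum x.natAbs) := by
  induction m with
  | zero =>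
    intro k res hm hlen _
    rw [PySem.List.pyRange_one_eq_nil (by exact_mod_cast Nat.le_of_sub_eq_zero hm)]
    rw [List.foldl_nil, List.take_of_length_le (by omega), List.drop_eq_nil_of_le (by omega)]
    simp
  | succ m ih =>
    intro k res hm hlen hz
    have hk : k < numbers.length := by omega
    rw [PySem.List.pyRange_one_cons (by exact_mod_cast hk), List.foldl_cons]
    simp only [PySem.List.pyGetD_natCast]
    rw [pvWhileA_eq (|numbers.getD k 0|).toNat _ rfl (abs_nonneg _) res k (by omega)]
    rw [hz k le_rfl, zero_add]
    have habs : (|numbers.getD k 0|).toNat = (numbers.getD k 0).natAbs := by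
      rw [Int.abs_eq_natAbs, Int.toNat_natCast]
    rw [habs]
    have hcast : ((k : Int) + 1) = ((k + 1 : Nat) : Int) := by push_cast; ring
    rw [hcast]
    rw [ih (k + 1) _ (by omega) (by simp [hlen])
      (by intro j hj
          have hne : k ≠ j := by omega
          simp only [List.getD, List.getElem?_set_ne hne]
          exact hz j (by omega))]
    rw [pvTakeSet res k _ (by omega)]
    rw [List.drop_eq_getElem_cons hk, List.map_cons]
    rw [List.getD_eq_getElem numbers 0 hk]
    simp

-- ===== VERDICT (by name: the statement is the Claim_ definition above) =====
theorem sum_digits_prealloc_spec : Claim_equal_sum_digits_prealloc := by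
  intro numbers _
  unfold Spec_sum_digits_prealloc sum_digits_prealloc_alt
  have h0 : sum_digits_prealloc numbers
      = (PySem.List.pyRange ((0 : Nat) : Int) (numbers.length : Int) 1).foldl
          (fun r i => pvWhileA r i |PySem.List.pyGetD numbers i 0|)
          (List.replicate numbers.length 0) := rfl
  rw [h0, pvFoldA numbers numbers.length 0 _ (by omega) (by simp) (by intro j _; simp [List.getD])]
  simp only [List.take_zero, List.drop_zero, List.nil_append]
  exact (List.map_congr_left fun x _ => (pvCharSum x).symm)
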